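-- pv_equiv track=rewrite | github.com/blancasnz/pythoninterview | dot_product.py | compress_sparse_matrix
-- ===== SOURCE A (Python) =====
-- def compress_sparse_matrix(a):
--     index = 0
--     output = []
--     while index < len(a):
--         if a[index] != 0:
--             output.append(str(a[index]))
--             index += 1
--             continue
--
--         count = 0
--         while index < len(a) and a[index] == 0:
--             index += 1
--             count += 1
--         output.append("0" + str(count))
--
--     return output
-- ===== SOURCE B (Python) =====
-- def compress_sparse_matrix(a):
--     # Stage 1: record the positions of the nonzero entries.
--     # Stage 2: reconstruct the zero runs purely from the gaps between
--     # consecutive nonzero positions (and the tail gap up to len(a)).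
--     nz = [(i, v) for i, v in enumerate(a) if v != 0]
--     output = []
--     prev = 0
--     for i, v in nz:
--         if prev < i:
--             output.append("0" + str(i - prev))
--         output.append(str(v))
--         prev = i + 1
--     if prev < len(a):
--         output.append("0" + str(len(a) - prev))
--     return output
-- ===== Notes on version B (the rewrite author's own statement) =====
-- stated objective: alternative
-- what changed: Instead of walking the array with a nested zero-counting while-loop, B first collects the nonzero positions and then derives every zero-run length arithmetically from the gaps between consecutive nonzero indices (plus the tail gap to len(a)).
import Mathlib
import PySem

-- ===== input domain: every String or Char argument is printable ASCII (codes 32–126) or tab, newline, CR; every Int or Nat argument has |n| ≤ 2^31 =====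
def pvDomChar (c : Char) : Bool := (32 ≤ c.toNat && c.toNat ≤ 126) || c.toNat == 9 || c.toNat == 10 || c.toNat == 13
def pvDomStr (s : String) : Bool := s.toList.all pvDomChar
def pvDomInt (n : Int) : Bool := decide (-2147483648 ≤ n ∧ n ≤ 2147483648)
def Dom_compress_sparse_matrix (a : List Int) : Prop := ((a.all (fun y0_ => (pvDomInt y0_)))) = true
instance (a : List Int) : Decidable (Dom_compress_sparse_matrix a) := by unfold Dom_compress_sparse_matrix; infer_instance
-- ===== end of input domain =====

-- B is a two-stage alternative: it first collects the nonzero positions of the array,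
-- then derives every zero-run length arithmetically from the gaps between consecutive
-- nonzero indices (plus the tail gap to len(a)), instead of A's index walk with a
-- nested zero-counting while-loop. Return values proved equal on the whole domain.


-- ===== PORT A =====
-- the inner `while index < len(a) and a[index] == 0` loop: returns (count, rest)
def pvCountZeros (l : List Int) : Nat × List Int :=
  match l with
  | [] => (0, [])
  | x :: xs => if x = 0 then let (c, r) := pvCountZeros xs; (c + 1, r) else (0, x :: xs)

theorem pvCountZeros_len (l : List Int) : (pvCountZeros l).2.length ≤ l.length := by
  induction l with
  | nil => simp [pvCountZeros]
  | cons x xs ih =>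
    simp only [pvCountZeros]
    split
    · simpa using Nat.le_succ_of_le ih
    · simp

-- the outer `while index < len(a)` loop, walking the remaining suffix
def pvLoopA (l : List Int) : List String :=
  match l with
  | [] => []
  | x :: xs =>
    if x ≠ 0 then PySem.Int.toStr x :: pvLoopA xs
    else
      let cr := pvCountZeros (x :: xs)
      ("0" ++ PySem.Int.toStr (cr.1 : Int)) :: pvLoopA cr.2
  termination_by l.length
  decreasing_by
  · simp
  · simp only [pvCountZeros, if_pos (by omega : x = 0)]
    have := pvCountZeros_len xs
    simp only [List.length_cons]
    omega

def compress_sparse_matrix (a : List Int) : List String := pvLoopA a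

-- ===== PORT B =====
-- `enumerate(a)` starting at index p
def pvEnumFrom (p : Nat) : List Int → List (Nat × Int)
  | [] => []
  | x :: xs => (p, x) :: pvEnumFrom (p + 1) xs

-- stage 1: `nz = [(i, v) for i, v in enumerate(a) if v != 0]`
def pvNZ (a : List Int) : List (Nat × Int) :=
  (pvEnumFrom 0 a).filter (fun q => q.2 ≠ 0)

-- stage 2: the `for i, v in nz` loop plus the trailing-gap check, with `prev` as parameter
def pvEmit (total : Nat) (nz : List (Nat × Int)) (prev : Nat) : List String :=
  match nz with
  | [] => if prev < total then ["0" ++ PySem.Int.toStr ((total - prev : Nat) : Int)] else []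
  | (i, v) :: rest =>
    (if prev < i then ["0" ++ PySem.Int.toStr ((i - prev : Nat) : Int)] else []) ++
      (PySem.Int.toStr v :: pvEmit total rest (i + 1))

def compress_sparse_matrix_alt (a : List Int) : List String :=
  pvEmit a.length (pvNZ a) 0

-- ===== PRECONDITION & SPEC =====
def Spec_compress_sparse_matrix (a : List Int) (out : List String) : Prop := out = compress_sparse_matrix_alt a
instance (a : List Int) (out : List String) : Decidable (Spec_compress_sparse_matrix a out) := by unfold Spec_compress_sparse_matrix; infer_instance

-- ===== CLAIM (what is proved, stated in full; the proofs are below) =====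
def Claim_equal_compress_sparse_matrix : Prop := ∀ (a : List Int), Dom_compress_sparse_matrix a → Spec_compress_sparse_matrix a (compress_sparse_matrix a)

-- ===== LEMMAS AND PROOFS =====

-- countZeros splits l into its zero prefix and a rest that is empty or starts nonzero
theorem pvCountZeros_spec (l : List Int) :
    l.length = (pvCountZeros l).1 + (pvCountZeros l).2.length ∧
    ((pvCountZeros l).2 = [] ∨ ∃ y ys, (pvCountZeros l).2 = y :: ys ∧ y ≠ 0) := by
  induction l with
  | nil => simp [pvCountZeros]
  | cons x xs ih =>
    by_cases hx : x = 0
    · subst hx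
      simp only [pvCountZeros]
      obtain ⟨h1, h2⟩ := ih
      exact ⟨by simp [h1]; omega, h2⟩
    · simp [pvCountZeros, hx]

-- filtering the enumeration skips the zero prefix counted by countZeros
theorem pvFilter_enum_countZeros (l : List Int) (p : Nat) :
    (pvEnumFrom p l).filter (fun q => q.2 ≠ 0) =
      (pvEnumFrom (p + (pvCountZeros l).1) (pvCountZeros l).2).filter (fun q => q.2 ≠ 0) := by
  induction l generalizing p with
  | nil => simp [pvCountZeros]
  | cons x xs ih =>
    by_cases hx : x = 0
    · subst hx
      simp only [pvCountZeros, pvEnumFrom, List.filter_cons]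
      rw [ih (p + 1)]
      norm_num
      ring_nf
    · simp [pvCountZeros, hx]

-- emitting with prev = p, where the next c ≥ 1 indices are absent from nz,
-- first emits the gap token "0"+c and then continues with prev = p + c
theorem pvEmit_gap (r : List Int) (p c : Nat) (hc : 0 < c)
    (hr : r = [] ∨ ∃ y ys, r = y :: ys ∧ y ≠ 0) :
    pvEmit (p + c + r.length) ((pvEnumFrom (p + c) r).filter (fun q => q.2 ≠ 0)) p =
      ("0" ++ PySem.Int.toStr (c : Int)) ::
        pvEmit (p + c + r.length) ((pvEnumFrom (p + c) r).filter (fun q => q.2 ≠ 0)) (p + c) := by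
  rcases hr with rfl | ⟨y, ys, rfl, hy⟩
  · simp [pvEnumFrom, pvEmit]
    omega
  · simp only [pvEnumFrom, List.filter_cons]
    rw [if_pos (by simpa using hy)]
    simp only [pvEmit]
    rw [if_pos (by omega), if_neg (by omega)]
    have h1 : p + c - p = c := by omega
    simp only [List.nil_append, List.cons_append, h1]

-- main invariant: B's gap-emitting pass over the filtered enumeration of a suffix,
-- started at offset p with prev = p, reproduces A's walk of that suffix
theorem pvEmit_eq_loopA (l : List Int) :
    ∀ p, pvEmit (p + l.length) ((pvEnumFrom p l).filter (fun q => q.2 ≠ 0)) p = pvLoopA l := by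
  induction l using pvLoopA.induct with
  | case1 => intro p; simp [pvEnumFrom, pvEmit, pvLoopA]
  | case2 x xs hx ih =>
    intro p
    simp only [pvEnumFrom, List.filter_cons]
    rw [if_pos (by simpa using hx)]
    simp only [pvEmit]
    rw [if_neg (by omega)]
    have : p + (x :: xs).length = (p + 1) + xs.length := by simp; omega
    rw [this, ih (p + 1)]
    simp [pvLoopA, hx]
  | case3 x xs hx cr ih =>
    intro p
    have hx0 : x = 0 := by simpa using hx
    obtain ⟨hlen, hshape⟩ := pvCountZeros_spec (x :: xs)
    have hc : 0 < (pvCountZeros (x :: xs)).1 := by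
      subst hx0; simp [pvCountZeros]
    rw [pvFilter_enum_countZeros (x :: xs) p]
    have htot : p + (x :: xs).length =
        p + (pvCountZeros (x :: xs)).1 + (pvCountZeros (x :: xs)).2.length := by omega
    rw [htot, pvEmit_gap _ p _ hc hshape]
    rw [ih (p + (pvCountZeros (x :: xs)).1)]
    conv_rhs => rw [pvLoopA]
    rw [if_neg hx]

-- ===== VERDICT (by name: the statement is the Claim_ definition above) =====
theorem compress_sparse_matrix_spec : Claim_equal_compress_sparse_matrix := by
  intro a _
  unfold Spec_compress_sparse_matrix compress_sparse_matrix compress_sparse_matrix_alt pvNZ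
  have h := pvEmit_eq_loopA a 0
  rw [Nat.zero_add] at h
  exact h.symm
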